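-- pv_equiv track=rewrite | github.com/Antimateria9000/Generador-de-datasets | dataset_core/validation_external.py | _aggregate_comparison_status
-- ===== SOURCE A (Python) =====
-- from typing import Iterable, Literal
--
-- ComparisonStatus = Literal["passed", "failed", "not_validated", "adapter_error", "validation_error"]
--
-- def _aggregate_comparison_status(adapter_reports: list[dict[str, object]]) -> ComparisonStatus:
--     statuses = [str(report.get("comparison_status") or "").strip().lower() for report in adapter_reports]
--     if any(status == "failed" for status in statuses):
--         return "failed"
--     if any(status == "validation_error" for status in statuses):
--         return "validation_error"
--     if any(status == "adapter_error" for status in statuses):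
--         return "adapter_error"
--     if any(status == "passed" for status in statuses):
--         return "passed"
--     return "not_validated"
-- ===== SOURCE B (Python) =====
-- _RANK = {"failed": 0, "validation_error": 1, "adapter_error": 2, "passed": 3}
-- _TABLE = ["failed", "validation_error", "adapter_error", "passed", "not_validated"]
--
-- def _aggregate_comparison_status(adapter_reports):
--     best = 4
--     for report in adapter_reports:
--         status = str(report.get("comparison_status") or "").strip().lower()
--         best = min(best, _RANK.get(status, 4))
--     return _TABLE[best]
-- ===== Notes on version B (the rewrite author's own statement) =====
-- stated objective: alternative
-- what changed: Replaces four sequential any() scans over a precomputed statuses list by a single pass that tracks the minimum priority rank (via a rank dict) and maps it back through a priority table.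
import Mathlib
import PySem

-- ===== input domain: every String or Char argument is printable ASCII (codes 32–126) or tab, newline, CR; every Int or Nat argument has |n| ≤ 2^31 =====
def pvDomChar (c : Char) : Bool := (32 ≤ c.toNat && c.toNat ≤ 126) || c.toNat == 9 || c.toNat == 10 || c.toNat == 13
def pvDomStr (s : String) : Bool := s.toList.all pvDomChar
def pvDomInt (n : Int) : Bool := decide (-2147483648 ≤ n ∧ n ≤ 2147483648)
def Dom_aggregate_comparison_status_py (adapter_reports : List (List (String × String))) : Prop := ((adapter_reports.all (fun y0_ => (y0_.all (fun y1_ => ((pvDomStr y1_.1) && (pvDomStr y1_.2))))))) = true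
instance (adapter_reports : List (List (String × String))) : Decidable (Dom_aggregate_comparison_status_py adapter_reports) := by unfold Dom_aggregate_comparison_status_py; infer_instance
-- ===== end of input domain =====

-- B replaces A's four sequential any() scans by one pass tracking the minimum priority rank; alternative decomposition, same asymptotic cost.

-- ===== PORT A =====
-- str(report.get("comparison_status") or "").strip().lower()  (shared normalization expression of both Pythons)
def pvNorm (report : List (String × String)) : String :=
  PySem.Str.lower (PySem.Str.strip ((PySem.Dict.mk report).getD "comparison_status" ""))

def aggregate_comparison_status_py (adapter_reports : List (List (String × String))) : String :=
  let statuses := adapter_reports.map pvNorm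
  if statuses.any (fun status => status == "failed") then "failed"
  else if statuses.any (fun status => status == "validation_error") then "validation_error"
  else if statuses.any (fun status => status == "adapter_error") then "adapter_error"
  else if statuses.any (fun status => status == "passed") then "passed"
  else "not_validated"

-- ===== PORT B =====
def pvRANK : PySem.Dict String Int :=
  PySem.Dict.ofList [("failed", 0), ("validation_error", 1), ("adapter_error", 2), ("passed", 3)]

def pvTABLE : List String := ["failed", "validation_error", "adapter_error", "passed", "not_validated"]

def aggregate_comparison_status_py_alt (adapter_reports : List (List (String × String))) : String :=
  let best : Int := adapter_reports.foldl
    (fun best report => min best (pvRANK.getD (pvNorm report) 4)) 4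
  PySem.List.pyGetD pvTABLE best ""

-- ===== PRECONDITION & SPEC =====
def Spec_aggregate_comparison_status_py (adapter_reports : List (List (String × String))) (out : String) : Prop := out = aggregate_comparison_status_py_alt adapter_reports
instance (adapter_reports : List (List (String × String))) (out : String) : Decidable (Spec_aggregate_comparison_status_py adapter_reports out) := by unfold Spec_aggregate_comparison_status_py; infer_instance

-- ===== CLAIM (what is proved, stated in full; the proofs are below) =====
def Claim_equal_aggregate_comparison_status_py : Prop := ∀ (adapter_reports : List (List (String × String))), Dom_aggregate_comparison_status_py adapter_reports → Spec_aggregate_comparison_status_py adapter_reports (aggregate_comparison_status_py adapter_reports)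

-- ===== LEMMAS AND PROOFS =====

def pvRankOf (s : String) : Int := pvRANK.getD s 4

theorem pvRankOf_eq (s : String) :
    pvRankOf s = if s = "failed" then 0 else if s = "validation_error" then 1
      else if s = "adapter_error" then 2 else if s = "passed" then 3 else 4 := by
  have h : pvRANK = PySem.Dict.mk [("failed", 0), ("validation_error", 1), ("adapter_error", 2), ("passed", 3)] := by decide
  by_cases h1 : s = "failed"
  · subst h1; decide
  by_cases h2 : s = "validation_error"
  · subst h2; decide
  by_cases h3 : s = "adapter_error"
  · subst h3; decide
  by_cases h4 : s = "passed"
  · subst h4; decide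
  have h1' : ¬ ("failed" = s) := fun c => h1 c.symm
  have h2' : ¬ ("validation_error" = s) := fun c => h2 c.symm
  have h3' : ¬ ("adapter_error" = s) := fun c => h3 c.symm
  have h4' : ¬ ("passed" = s) := fun c => h4 c.symm
  simp [pvRankOf, h, PySem.Dict.getD, PySem.Dict.get?,
    beq_iff_eq, h1, h2, h3, h4, h1', h2', h3', h4']

theorem pvRankOf_nonneg (s : String) : 0 ≤ pvRankOf s := by
  rw [pvRankOf_eq]; split_ifs <;> norm_num

theorem pvFold_le_iff (l : List String) (a j : Int) :
    (l.foldl (fun b s => min b (pvRankOf s)) a ≤ j) ↔ (a ≤ j ∨ ∃ s ∈ l, pvRankOf s ≤ j) := by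
  induction l generalizing a with
  | nil => simp
  | cons x xs ih =>
    simp only [List.foldl_cons, ih, min_le_iff, List.mem_cons]
    constructor
    · rintro ((h | h) | ⟨s, hs, h⟩)
      · exact Or.inl h
      · exact Or.inr ⟨x, Or.inl rfl, h⟩
      · exact Or.inr ⟨s, Or.inr hs, h⟩
    · rintro (h | ⟨s, (rfl | hs), h⟩)
      · exact Or.inl (Or.inl h)
      · exact Or.inl (Or.inr h)
      · exact Or.inr ⟨s, hs, h⟩

theorem pvFold_nonneg (l : List String) (a : Int) (ha : 0 ≤ a) :
    0 ≤ l.foldl (fun b s => min b (pvRankOf s)) a := by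
  induction l generalizing a with
  | nil => exact ha
  | cons x xs ih => exact ih _ (le_min ha (pvRankOf_nonneg x))

theorem pvRank_le_iff (l : List String) (j : Int) (hj0 : 0 ≤ j) (hj : j < 4) :
    (∃ s ∈ l, pvRankOf s ≤ j) ↔
      ("failed" ∈ l ∨ (1 ≤ j ∧ "validation_error" ∈ l) ∨ (2 ≤ j ∧ "adapter_error" ∈ l)
        ∨ (3 ≤ j ∧ "passed" ∈ l)) := by
  constructor
  · rintro ⟨s, hs, hr⟩
    rw [pvRankOf_eq] at hr
    split_ifs at hr with c1 c2 c3 c4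
    · exact Or.inl (c1 ▸ hs)
    · exact Or.inr (Or.inl ⟨by omega, c2 ▸ hs⟩)
    · exact Or.inr (Or.inr (Or.inl ⟨by omega, c3 ▸ hs⟩))
    · exact Or.inr (Or.inr (Or.inr ⟨by omega, c4 ▸ hs⟩))
    · omega
  · rintro (h | ⟨h1, h⟩ | ⟨h2, h⟩ | ⟨h3, h⟩) <;>
      exact ⟨_, h, by rw [pvRankOf_eq]; split_ifs <;> first | omega | simp_all⟩

-- core: A's any-chain over a list of statuses equals B's table lookup at the fold minimum
theorem pvMain (l : List String) :
    (if l.any (fun s => s == "failed") then "failed"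
     else if l.any (fun s => s == "validation_error") then "validation_error"
     else if l.any (fun s => s == "adapter_error") then "adapter_error"
     else if l.any (fun s => s == "passed") then "passed"
     else "not_validated")
    = PySem.List.pyGetD pvTABLE (l.foldl (fun b s => min b (pvRankOf s)) 4) "" := by
  have hany : ∀ x : String, l.any (fun s => s == x) = decide (x ∈ l) := by
    intro x; simp [List.any_beq']
  set m := l.foldl (fun b s => min b (pvRankOf s)) 4 with hm
  have h0 : 0 ≤ m := pvFold_nonneg l 4 (by norm_num)
  have h4 : m ≤ 4 := by rw [hm, pvFold_le_iff]; exact Or.inl le_rfl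
  have hiff : ∀ j : Int, 0 ≤ j → j < 4 → (m ≤ j ↔
      ("failed" ∈ l ∨ (1 ≤ j ∧ "validation_error" ∈ l) ∨ (2 ≤ j ∧ "adapter_error" ∈ l)
        ∨ (3 ≤ j ∧ "passed" ∈ l))) := by
    intro j hj0 hj
    rw [hm, pvFold_le_iff, ← pvRank_le_iff l j hj0 hj]
    constructor
    · rintro (h | h)
      · omega
      · exact h
    · exact Or.inr
  simp only [hany]
  interval_cases m
  · have hf : "failed" ∈ l := by
      have := (hiff 0 le_rfl (by norm_num)).1 le_rfl
      rcases this with h | ⟨h, _⟩ | ⟨h, _⟩ | ⟨h, _⟩ <;> first | exact h | omega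
    simp [hf]
    decide
  · have h1 := (hiff 1 (by norm_num) (by norm_num)).1 (by norm_num)
    have h0' := (hiff 0 le_rfl (by norm_num))
    have hnf : "failed" ∉ l := fun c => by have := h0'.2 (Or.inl c); omega
    have hv : "validation_error" ∈ l := by
      rcases h1 with h | ⟨_, h⟩ | ⟨h, _⟩ | ⟨h, _⟩ <;> first | exact h | exact absurd h hnf | omega
    simp [hnf, hv]
    decide
  · have h2 := (hiff 2 (by norm_num) (by norm_num)).1 (by norm_num)
    have h1' := (hiff 1 (by norm_num) (by norm_num))
    have hnf : "failed" ∉ l := fun c => by have := h1'.2 (Or.inl c); omega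
    have hnv : "validation_error" ∉ l := fun c => by
      have := h1'.2 (Or.inr (Or.inl ⟨le_rfl, c⟩)); omega
    have ha : "adapter_error" ∈ l := by
      rcases h2 with h | ⟨_, h⟩ | ⟨_, h⟩ | ⟨h, _⟩ <;>
        first | exact h | exact absurd h hnf | exact absurd h hnv | omega
    simp [hnf, hnv, ha]
    decide
  · have h3 := (hiff 3 (by norm_num) (by norm_num)).1 (by norm_num)
    have h2' := (hiff 2 (by norm_num) (by norm_num))
    have hnf : "failed" ∉ l := fun c => by have := h2'.2 (Or.inl c); omega
    have hnv : "validation_error" ∉ l := fun c => by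
      have := h2'.2 (Or.inr (Or.inl ⟨by norm_num, c⟩)); omega
    have hna : "adapter_error" ∉ l := fun c => by
      have := h2'.2 (Or.inr (Or.inr (Or.inl ⟨le_rfl, c⟩))); omega
    have hp : "passed" ∈ l := by
      rcases h3 with h | ⟨_, h⟩ | ⟨_, h⟩ | ⟨_, h⟩ <;>
        first | exact h | exact absurd h hnf | exact absurd h hnv | exact absurd h hna
    simp [hnf, hnv, hna, hp]
    decide
  · have h3' := (hiff 3 (by norm_num) (by norm_num))
    have hnf : "failed" ∉ l := fun c => by have := h3'.2 (Or.inl c); omega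
    have hnv : "validation_error" ∉ l := fun c => by
      have := h3'.2 (Or.inr (Or.inl ⟨by norm_num, c⟩)); omega
    have hna : "adapter_error" ∉ l := fun c => by
      have := h3'.2 (Or.inr (Or.inr (Or.inl ⟨by norm_num, c⟩))); omega
    have hnp : "passed" ∉ l := fun c => by
      have := h3'.2 (Or.inr (Or.inr (Or.inr ⟨le_rfl, c⟩))); omega
    simp [hnf, hnv, hna, hnp]
    decide

-- ===== VERDICT (by name: the statement is the Claim_ definition above) =====
theorem aggregate_comparison_status_py_spec : Claim_equal_aggregate_comparison_status_py := by
  intro reports _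
  show aggregate_comparison_status_py reports = aggregate_comparison_status_py_alt reports
  unfold aggregate_comparison_status_py aggregate_comparison_status_py_alt
  have hfold : reports.foldl (fun best report => min best (pvRANK.getD (pvNorm report) 4)) (4 : Int)
      = (reports.map pvNorm).foldl (fun b s => min b (pvRankOf s)) 4 := by
    rw [List.foldl_map]; rfl
  rw [hfold]
  exact pvMain (reports.map pvNorm)
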